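-- pv_equiv track=rewrite | github.com/arek-czerwinski/algorithms-in-python | chapter_6/exercises.py | move_elements_stack_t_to_stack_s_with_original_sequence
-- ===== SOURCE A (Python) =====
-- from typing import List, Tuple, Any, Dict, Optional, Callable
--
-- def move_elements_stack_t_to_stack_s_with_original_sequence(
--         r: List[Any],
--         s: List[Any],
--         t: List[Any],
-- ):
--     copy_r = list(r)
--     copy_s = list(s)
--     copy_t = list(t)
--     size_t = len(t)
--
--     while copy_t:
--         copy_r.append(copy_t.pop())
--
--     while copy_s:
--         copy_t.append(copy_s.pop())
--
--     while size_t: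
--         copy_s.append(copy_r.pop())
--         size_t -= 1
--     while copy_t:
--         copy_s.append(copy_t.pop())
--
--     return copy_r, copy_s, copy_t
-- ===== SOURCE B (Python) =====
-- from typing import List, Any
--
-- def move_elements_stack_t_to_stack_s_with_original_sequence(
--         r: List[Any],
--         s: List[Any],
--         t: List[Any],
-- ):
--     # Net effect of the four stack passes: r unchanged, middle stack = t then s, third emptied.
--     return list(r), list(t) + list(s), []
-- ===== Notes on version B (the rewrite author's own statement) =====
-- stated objective: simpler
-- what changed: B replaces the four pop/append stack-shuffling loops with the closed form (copy of r, t + s, []) built directly by one concatenation.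
import Mathlib
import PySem

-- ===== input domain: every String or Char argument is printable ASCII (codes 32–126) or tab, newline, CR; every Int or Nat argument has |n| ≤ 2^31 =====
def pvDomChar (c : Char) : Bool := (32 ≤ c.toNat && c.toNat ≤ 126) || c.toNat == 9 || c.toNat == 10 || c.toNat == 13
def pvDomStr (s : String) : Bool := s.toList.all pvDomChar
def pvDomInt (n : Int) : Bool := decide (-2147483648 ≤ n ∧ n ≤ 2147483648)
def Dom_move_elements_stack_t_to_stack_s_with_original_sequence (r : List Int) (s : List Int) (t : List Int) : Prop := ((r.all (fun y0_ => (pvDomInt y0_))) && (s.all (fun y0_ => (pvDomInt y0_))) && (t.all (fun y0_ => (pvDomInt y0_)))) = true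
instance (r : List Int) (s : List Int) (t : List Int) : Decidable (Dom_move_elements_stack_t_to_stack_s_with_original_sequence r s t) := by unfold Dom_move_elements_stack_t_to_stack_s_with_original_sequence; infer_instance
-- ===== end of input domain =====

-- B replaces A's four pop/append stack-shuffling loops with the direct closed form (r, t ++ s, []); objective: simpler.


-- ===== PORT A =====
-- `while src: dst.append(src.pop())` — pop from the end of src, push onto dst, until src is empty
def pvWhilePop (dst src : List Int) : List Int × List Int :=
  if h : src = [] then (dst, src)
  else pvWhilePop (dst ++ [src.getLast h]) src.dropLast
termination_by src.length
decreasing_by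
  have := List.length_pos_of_ne_nil h
  simp [List.length_dropLast]; omega

-- `while size_t: dst.append(src.pop()); size_t -= 1` — counted pops from the end of src
-- (in A, src always holds at least n elements here, so Python's pop never raises)
def pvWhilePopN (dst src : List Int) (n : Nat) : List Int × List Int :=
  match n with
  | 0 => (dst, src)
  | Nat.succ m =>
    if h : src = [] then (dst, src)
    else pvWhilePopN (dst ++ [src.getLast h]) src.dropLast m

def move_elements_stack_t_to_stack_s_with_original_sequence (r : List Int) (s : List Int) (t : List Int) : List Int × List Int × List Int :=
  let copy_r := r
  let copy_s := s
  let copy_t := t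
  let size_t := t.length
  let p1 := pvWhilePop copy_r copy_t      -- while copy_t: copy_r.append(copy_t.pop())
  let copy_r := p1.1
  let copy_t := p1.2
  let p2 := pvWhilePop copy_t copy_s      -- while copy_s: copy_t.append(copy_s.pop())
  let copy_t := p2.1
  let copy_s := p2.2
  let p3 := pvWhilePopN copy_s copy_r size_t  -- while size_t: copy_s.append(copy_r.pop())
  let copy_s := p3.1
  let copy_r := p3.2
  let p4 := pvWhilePop copy_s copy_t      -- while copy_t: copy_s.append(copy_t.pop())
  let copy_s := p4.1
  let copy_t := p4.2
  (copy_r, copy_s, copy_t)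

-- ===== PORT B =====
def move_elements_stack_t_to_stack_s_with_original_sequence_alt (r : List Int) (s : List Int) (t : List Int) : List Int × List Int × List Int :=
  (r, t ++ s, [])

-- ===== PRECONDITION & SPEC =====
def Spec_move_elements_stack_t_to_stack_s_with_original_sequence (r : List Int) (s : List Int) (t : List Int) (out : List Int × List Int × List Int) : Prop := out = move_elements_stack_t_to_stack_s_with_original_sequence_alt r s t
instance (r : List Int) (s : List Int) (t : List Int) (out : List Int × List Int × List Int) : Decidable (Spec_move_elements_stack_t_to_stack_s_with_original_sequence r s t out) := by unfold Spec_move_elements_stack_t_to_stack_s_with_original_sequence; infer_instance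

-- ===== CLAIM (what is proved, stated in full; the proofs are below) =====
def Claim_equal_move_elements_stack_t_to_stack_s_with_original_sequence : Prop := ∀ (r : List Int) (s : List Int) (t : List Int), Dom_move_elements_stack_t_to_stack_s_with_original_sequence r s t → Spec_move_elements_stack_t_to_stack_s_with_original_sequence r s t (move_elements_stack_t_to_stack_s_with_original_sequence r s t)

-- ===== LEMMAS AND PROOFS =====
theorem pvWhilePop_eq (dst src : List Int) : pvWhilePop dst src = (dst ++ src.reverse, []) := by
  induction src using List.reverseRecOn generalizing dst with
  | nil => simp [pvWhilePop]
  | append_singleton xs x ih =>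
    rw [pvWhilePop]
    simp [ih]

theorem pvWhilePopN_eq (dst a b : List Int) : pvWhilePopN dst (a ++ b) b.length = (dst ++ b.reverse, a) := by
  induction b using List.reverseRecOn generalizing dst with
  | nil => simp [pvWhilePopN]
  | append_singleton xs x ih =>
    have hne : a ++ (xs ++ [x]) ≠ [] := by simp
    have hlast : (a ++ (xs ++ [x])).getLast hne = x := by
      rw [List.getLast_append_of_ne_nil (by simp)]
      exact List.getLast_append_singleton (l := xs)
    have hdrop : (a ++ (xs ++ [x])).dropLast = a ++ xs := by
      rw [← List.append_assoc]
      simpa using List.dropLast_concat (l := a ++ xs) (b := x)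
    simp only [List.length_append, List.length_cons, List.length_nil, pvWhilePopN, hne,
      hlast, hdrop]
    rw [ih]
    simp

-- ===== VERDICT (by name: the statement is the Claim_ definition above) =====
theorem move_elements_stack_t_to_stack_s_with_original_sequence_spec : Claim_equal_move_elements_stack_t_to_stack_s_with_original_sequence := by
  intro r s t _
  unfold Spec_move_elements_stack_t_to_stack_s_with_original_sequence
  unfold move_elements_stack_t_to_stack_s_with_original_sequence
  unfold move_elements_stack_t_to_stack_s_with_original_sequence_alt
  simp only [pvWhilePop_eq]
  have h3 : pvWhilePopN [] (r ++ t.reverse) t.length = ([] ++ t.reverse.reverse, r) := by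
    have := pvWhilePopN_eq [] r t.reverse
    simpa using this
  simp [h3]
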